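-- pv_equiv track=rewrite | github.com/darreld/AOC24 | 2/p2.py | find_fixable_sequences
-- ===== SOURCE A (Python) =====
-- def find_fixable_sequences(numbers):
--     """
--     Finds sequences that can be made valid by removing one number.
--     Valid sequences must be monotonic (all increasing or all decreasing)
--     with differences between 1 and 3 inclusive.
--
--     Args:
--         numbers: List[int] - list of numbers to check
--
--     Returns:
--         list: List of valid sequences after removing one number
--     """
--     if len(numbers) <= 2:
--         return []
--
--     def is_valid_sequence(nums):
--         if len(nums) <= 1:
--             return True
--
--         diffs = [nums[i + 1] - nums[i] for i in range(len(nums) - 1)]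
--         # Check if all differences are between 1 and 3 (increasing)
--         all_positive = all(1 <= d <= 3 for d in diffs)
--         # Check if all differences are between -3 and -1 (decreasing)
--         all_negative = all(-3 <= d <= -1 for d in diffs)
--         return all_positive or all_negative
--
--     valid_sequences = []
--     # Try removing each number one at a time
--     for i in range(len(numbers)):
--         test_sequence = numbers[:i] + numbers[i + 1:]
--         if is_valid_sequence(test_sequence):
--             valid_sequences.append(test_sequence)
--
--     return valid_sequences
--
--     valid_sequences = []
--     # Try removing each number
--     for i in range(len(numbers)):
--         test_sequence = numbers[:i] + numbers[i + 1:]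
--         if is_valid_sequence(test_sequence):
--             # Convert back to string format
--             valid_sequences.append(' '.join(map(str, test_sequence)))
--
--     return valid_sequences
-- ===== SOURCE B (Python) =====
-- def find_fixable_sequences(numbers):
--     """Prefix/suffix valid-run precomputation: each removal is decided in O(1)
--     from the difference list; candidates are built only for valid removals."""
--     n = len(numbers)
--     if n <= 2:
--         return []
--
--     d = [b - a for a, b in zip(numbers, numbers[1:])]
--     inc = [1 <= x <= 3 for x in d]
--     dec = [-3 <= x <= -1 for x in d]
--
--     def suffix_all(bits):
--         # out[j] == all(bits[j:])
--         out = [True]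
--         for b in reversed(bits):
--             out.insert(0, b and out[0])
--         return out
--
--     def prefix_all(bits):
--         # out[j] == all(bits[:j])
--         cur = True
--         out = [True]
--         for b in bits:
--             cur = cur and b
--             out.append(cur)
--         return out
--
--     suf_inc = suffix_all(inc)
--     suf_dec = suffix_all(dec)
--     pre_inc = prefix_all(inc)
--     pre_dec = prefix_all(dec)
--
--     res = []
--     for i in range(n):
--         if i == 0:
--             ok = suf_inc[1] or suf_dec[1]
--         elif i == n - 1:
--             ok = pre_inc[n - 2] or pre_dec[n - 2]
--         else:
--             m = d[i - 1] + d[i]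
--             ok = (pre_inc[i - 1] and 1 <= m <= 3 and suf_inc[i + 1]) or \
--                  (pre_dec[i - 1] and -3 <= m <= -1 and suf_dec[i + 1])
--         if ok:
--             res.append(numbers[:i] + numbers[i + 1:])
--     return res
-- ===== Notes on version B (the rewrite author's own statement) =====
-- stated objective: faster
-- what changed: Instead of rebuilding and re-scanning each length-(n-1) subsequence, B computes the difference list once, precomputes prefix/suffix all-valid run arrays for the increasing and decreasing tests, and decides each removal in O(1) (merging the two adjacent differences), building a candidate list only for valid removals.
import Mathlib
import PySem

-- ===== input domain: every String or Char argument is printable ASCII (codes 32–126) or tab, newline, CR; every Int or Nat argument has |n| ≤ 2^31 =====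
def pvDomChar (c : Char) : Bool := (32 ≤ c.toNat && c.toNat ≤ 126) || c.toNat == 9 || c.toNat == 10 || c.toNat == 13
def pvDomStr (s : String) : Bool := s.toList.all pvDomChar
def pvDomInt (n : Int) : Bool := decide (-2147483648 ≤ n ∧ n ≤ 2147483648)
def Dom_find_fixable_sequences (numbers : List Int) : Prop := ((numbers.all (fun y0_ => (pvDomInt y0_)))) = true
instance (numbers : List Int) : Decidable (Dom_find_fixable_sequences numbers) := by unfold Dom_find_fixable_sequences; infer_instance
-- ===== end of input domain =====

-- B changes the algorithm: the difference list is computed once and prefix/suffix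
-- all-valid run arrays decide each removal in O(1), instead of A's rebuild-and-rescan
-- of every candidate; the return value is proved identical.

-- ===== PORT A =====
-- A's inner helper is_valid_sequence, transliterated
def pvIsValidA (nums : List Int) : Bool :=
  if nums.length ≤ 1 then true
  else
    let diffs := (PySem.List.pyRange 0 ((nums.length : Int) - 1) 1).map
      (fun i => PySem.List.pyGetD nums (i + 1) 0 - PySem.List.pyGetD nums i 0)
    let all_positive := diffs.all (fun d => decide (1 ≤ d ∧ d ≤ 3))
    let all_negative := diffs.all (fun d => decide (-3 ≤ d ∧ d ≤ -1))
    all_positive || all_negative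

def find_fixable_sequences (numbers : List Int) : List (List Int) :=
  if numbers.length ≤ 2 then []
  else
    (PySem.List.pyRange 0 (numbers.length : Int) 1).foldl
      (fun acc i =>
        if pvIsValidA (PySem.List.slice numbers none (some i) ++
                       PySem.List.slice numbers (some (i + 1)) none) then
          acc ++ [PySem.List.slice numbers none (some i) ++
                  PySem.List.slice numbers (some (i + 1)) none]
        else acc) []

-- ===== PORT B =====
-- helper suffix_all of Source B: out[j] == all(bits[j:]); built back-to-front
def pvSufAll (bits : List Bool) : List Bool :=
  bits.foldr (fun b acc => (b && acc.headI) :: acc) [true]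

-- helper prefix_all of Source B: out[j] == all(bits[:j]); running conjunction, appended
def pvPreAll (bits : List Bool) : List Bool :=
  (bits.foldl (fun st b => (st.1 && b, st.2 ++ [st.1 && b])) (true, [true])).2

-- the O(1) per-removal test of Source B's final loop
def pvOkB (n : Int) (d : List Int) (sufInc sufDec preInc preDec : List Bool) (i : Int) : Bool :=
  if i == 0 then
    PySem.List.pyGetD sufInc 1 false || PySem.List.pyGetD sufDec 1 false
  else if i == n - 1 then
    PySem.List.pyGetD preInc (n - 2) false || PySem.List.pyGetD preDec (n - 2) false
  else
    let m := PySem.List.pyGetD d (i - 1) 0 + PySem.List.pyGetD d i 0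
    (PySem.List.pyGetD preInc (i - 1) false && decide (1 ≤ m ∧ m ≤ 3) &&
       PySem.List.pyGetD sufInc (i + 1) false) ||
    (PySem.List.pyGetD preDec (i - 1) false && decide (-3 ≤ m ∧ m ≤ -1) &&
       PySem.List.pyGetD sufDec (i + 1) false)

def find_fixable_sequences_alt (numbers : List Int) : List (List Int) :=
  if numbers.length ≤ 2 then []
  else
    let d := List.zipWith (fun a b => b - a) numbers (numbers.drop 1)
    let inc := d.map (fun x => decide (1 ≤ x ∧ x ≤ 3))
    let dec := d.map (fun x => decide (-3 ≤ x ∧ x ≤ -1))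
    let sufInc := pvSufAll inc
    let sufDec := pvSufAll dec
    let preInc := pvPreAll inc
    let preDec := pvPreAll dec
    (PySem.List.pyRange 0 (numbers.length : Int) 1).foldl
      (fun acc i =>
        if pvOkB (numbers.length : Int) d sufInc sufDec preInc preDec i then
          acc ++ [PySem.List.slice numbers none (some i) ++
                  PySem.List.slice numbers (some (i + 1)) none]
        else acc) []

-- ===== PRECONDITION & SPEC =====
def Spec_find_fixable_sequences (numbers : List Int) (out : List (List Int)) : Prop := out = find_fixable_sequences_alt numbers
instance (numbers : List Int) (out : List (List Int)) : Decidable (Spec_find_fixable_sequences numbers out) := by unfold Spec_find_fixable_sequences; infer_instance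

-- ===== CLAIM (what is proved, stated in full; the proofs are below) =====
def Claim_equal_find_fixable_sequences : Prop := ∀ (numbers : List Int), Dom_find_fixable_sequences numbers → Spec_find_fixable_sequences numbers (find_fixable_sequences numbers)

-- ===== LEMMAS AND PROOFS =====

-- the j-th difference of xs (getD form)
def pvDs (xs : List Int) (j : Nat) : Int := xs.getD (j + 1) 0 - xs.getD j 0

-- index normalisation for A's comprehension
theorem pv_getD_diff (nums : List Int) (j : Nat) :
    PySem.List.pyGetD nums ((j : Int) + 1) 0 - PySem.List.pyGetD nums ((j : Int)) 0
      = pvDs nums j := by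
  have h1 : (j : Int) + 1 = ((j + 1 : Nat) : Int) := by push_cast; ring
  rw [h1, PySem.List.pyGetD_natCast, PySem.List.pyGetD_natCast]
  rfl

-- A's validity test, characterised as two bounded ∀s over the differences
theorem pv_valA_eq (nums : List Int) (h : 2 ≤ nums.length) :
    (pvIsValidA nums = true) ↔
      ((∀ j < nums.length - 1, 1 ≤ pvDs nums j ∧ pvDs nums j ≤ 3) ∨
       (∀ j < nums.length - 1, -3 ≤ pvDs nums j ∧ pvDs nums j ≤ -1)) := by
  unfold pvIsValidA
  rw [if_neg (by omega)]
  have hm : ((nums.length : Int) - 1) = ((nums.length - 1 : Nat) : Int) := by omega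
  rw [hm, PySem.List.pyRange_one]
  simp only [sub_zero, Int.toNat_natCast, List.map_map, Bool.or_eq_true, List.all_map,
    List.all_eq_true, List.mem_range, Function.comp, decide_eq_true_eq, zero_add]
  constructor
  · rintro (hall | hall)
    · exact Or.inl (fun j hj => by have := hall j hj; rwa [pv_getD_diff] at this)
    · exact Or.inr (fun j hj => by have := hall j hj; rwa [pv_getD_diff] at this)
  · rintro (hall | hall)
    · exact Or.inl (fun j hj => by rw [pv_getD_diff]; exact hall j hj)
    · exact Or.inr (fun j hj => by rw [pv_getD_diff]; exact hall j hj)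

theorem pv_length_sufAll (bits : List Bool) : (pvSufAll bits).length = bits.length + 1 := by
  induction bits with
  | nil => rfl
  | cons b t ih => simpa [pvSufAll] using ih

theorem pv_sufAll_getD (bits : List Bool) (j : Nat) (hj : j ≤ bits.length) :
    (pvSufAll bits).getD j false = (bits.drop j).all id := by
  induction bits generalizing j with
  | nil =>
    obtain rfl : j = 0 := Nat.le_zero.mp (by simpa using hj)
    rfl
  | cons b t ih =>
    have hcons : pvSufAll (b :: t) = (b && (pvSufAll t).headI) :: pvSufAll t := rfl
    cases j with
    | zero =>
      obtain ⟨x, rest, hx⟩ : ∃ x rest, pvSufAll t = x :: rest := by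
        cases h : pvSufAll t with
        | nil => have := pv_length_sufAll t; rw [h] at this; simp at this
        | cons x rest => exact ⟨x, rest, rfl⟩
      have h0 := ih 0 (by omega)
      rw [hx] at h0
      simp only [List.getD_cons_zero] at h0
      rw [hcons, hx]
      simp [List.headI, h0]
    | succ j =>
      rw [hcons]
      simp only [List.getD_cons_succ, List.drop_succ_cons]
      exact ih j (by simpa using hj)

theorem pv_preAll_aux (bits : List Bool) (cur : Bool) (out : List Bool) :
    (bits.foldl (fun st b => (st.1 && b, st.2 ++ [st.1 && b])) (cur, out)).2
      = out ++ (List.range bits.length).map (fun t => cur && ((bits.take (t + 1)).all id)) := by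
  induction bits generalizing cur out with
  | nil => simp
  | cons b t ih =>
    rw [List.foldl_cons, ih]
    simp only [List.length_cons, List.range_succ_eq_map]
    simp [List.map_map, Function.comp, List.append_assoc, Bool.and_assoc,
      List.take_succ_cons, List.all_cons]

theorem pv_preAll_getD (bits : List Bool) (j : Nat) (hj : j ≤ bits.length) :
    (pvPreAll bits).getD j false = (bits.take j).all id := by
  unfold pvPreAll
  rw [pv_preAll_aux]
  cases j with
  | zero => simp
  | succ t =>
    have ht : t < bits.length := by omega
    have hcons : ([true] ++ (List.range bits.length).map
        (fun s => true && ((bits.take (s + 1)).all id)))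
        = true :: (List.range bits.length).map
        (fun s => true && ((bits.take (s + 1)).all id)) := rfl
    rw [hcons]
    simp only [List.getD_cons_succ]
    rw [List.getD_eq_getElem _ _ (by simpa using ht)]
    simp

theorem pv_d_getD (xs : List Int) (k : Nat) (hk : k + 1 < xs.length) :
    (List.zipWith (fun a b => b - a) xs (xs.drop 1)).getD k 0 = pvDs xs k := by
  have h2 : k < (List.zipWith (fun a b => b - a) xs (xs.drop 1)).length := by
    simp [List.length_zipWith]; omega
  rw [List.getD_eq_getElem _ _ h2, List.getElem_zipWith]
  unfold pvDs
  rw [List.getD_eq_getElem _ _ (by omega : k + 1 < xs.length),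
      List.getD_eq_getElem _ _ (by omega : k < xs.length)]
  rw [List.getElem_drop]
  simp_rw [Nat.add_comm 1 k]

theorem pv_length_d (xs : List Int) (h : 1 ≤ xs.length) :
    (List.zipWith (fun a b => b - a) xs (xs.drop 1)).length = xs.length - 1 := by
  simp only [List.length_zipWith, List.length_drop]
  omega

theorem pv_all_take_iff (l : List Int) (p : Int → Bool) (j : Nat) :
    ((l.take j).all p = true) ↔ ∀ k, k < l.length → k < j → p (l.getD k 0) = true := by
  rw [List.all_eq_true]
  constructor
  · intro h k hk hkj
    have hk' : k < (l.take j).length := by simp; omega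
    have hmem := h ((l.take j)[k]'hk') (List.getElem_mem hk')
    rw [List.getElem_take] at hmem
    rwa [List.getD_eq_getElem _ _ hk]
  · intro h x hx
    obtain ⟨k, hk', hEq⟩ := List.mem_iff_getElem.mp hx
    subst hEq
    rw [List.getElem_take]
    have hkl : k < l.length := by have := hk'; simp at this; omega
    have hkj : k < j := by have := hk'; simp at this; omega
    have := h k hkl hkj
    rwa [List.getD_eq_getElem _ _ hkl] at this

theorem pv_all_drop_iff (l : List Int) (p : Int → Bool) (j : Nat) :
    ((l.drop j).all p = true) ↔ ∀ k, k < l.length → j ≤ k → p (l.getD k 0) = true := by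
  rw [List.all_eq_true]
  constructor
  · intro h k hk hkj
    have hk' : k - j < (l.drop j).length := by simp; omega
    have hmem := h ((l.drop j)[k - j]'hk') (List.getElem_mem hk')
    rw [List.getElem_drop] at hmem
    simp_rw [Nat.add_sub_cancel' hkj] at hmem
    rw [List.getD_eq_getElem _ _ hk]
    exact hmem
  · intro h x hx
    obtain ⟨k, hk', hEq⟩ := List.mem_iff_getElem.mp hx
    subst hEq
    rw [List.getElem_drop]
    have hkl : j + k < l.length := by have := hk'; simp at this; omega
    have := h (j + k) hkl (by omega)
    rwa [List.getD_eq_getElem _ _ hkl] at this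

theorem pv_cand_getD (xs : List Int) (k j : Nat) (hk : k < xs.length) (hj : j < xs.length - 1) :
    (xs.take k ++ xs.drop (k + 1)).getD j 0
      = if j < k then xs.getD j 0 else xs.getD (j + 1) 0 := by
  have hlen : j < (xs.take k ++ xs.drop (k + 1)).length := by simp; omega
  rw [List.getD_eq_getElem _ _ hlen]
  by_cases hjk : j < k
  · rw [List.getElem_append_left (by simp; omega)]
    rw [List.getElem_take]
    rw [if_pos hjk, List.getD_eq_getElem _ _ (by omega : j < xs.length)]
  · have hge : (xs.take k).length ≤ j := by simp; omega
    rw [List.getElem_append_right hge]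
    rw [List.getElem_drop]
    rw [if_neg hjk, List.getD_eq_getElem _ _ (by omega : j + 1 < xs.length)]
    have e : k + 1 + (j - (xs.take k).length) = j + 1 := by simp; omega
    simp_rw [e]

theorem pv_length_cand (xs : List Int) (k : Nat) (hk : k < xs.length) :
    (xs.take k ++ xs.drop (k + 1)).length = xs.length - 1 := by
  simp; omega

-- reading B's suffix array at a Nat index
theorem pv_sufD (xs : List Int) (p : Int → Bool) (j : Nat) (h1 : 1 ≤ xs.length)
    (hj : j ≤ xs.length - 1) :
    (PySem.List.pyGetD
        (pvSufAll ((List.zipWith (fun a b => b - a) xs (xs.drop 1)).map p)) ((j : Nat) : Int) false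
      = true)
      ↔ ∀ t, t < xs.length - 1 → j ≤ t →
          p ((List.zipWith (fun a b => b - a) xs (xs.drop 1)).getD t 0) = true := by
  rw [PySem.List.pyGetD_natCast]
  rw [pv_sufAll_getD _ j (by rw [List.length_map, pv_length_d xs h1]; exact hj)]
  rw [← List.map_drop, List.all_map]
  have he : (id ∘ p) = p := rfl
  rw [he, pv_all_drop_iff]
  simp only [pv_length_d xs h1]

-- reading B's prefix array at a Nat index
theorem pv_preD (xs : List Int) (p : Int → Bool) (j : Nat) (h1 : 1 ≤ xs.length)
    (hj : j ≤ xs.length - 1) :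
    (PySem.List.pyGetD
        (pvPreAll ((List.zipWith (fun a b => b - a) xs (xs.drop 1)).map p)) ((j : Nat) : Int) false
      = true)
      ↔ ∀ t, t < xs.length - 1 → t < j →
          p ((List.zipWith (fun a b => b - a) xs (xs.drop 1)).getD t 0) = true := by
  rw [PySem.List.pyGetD_natCast]
  rw [pv_preAll_getD _ j (by rw [List.length_map, pv_length_d xs h1]; exact hj)]
  rw [← List.map_take, List.all_map]
  have he : (id ∘ p) = p := rfl
  rw [he, pv_all_take_iff]
  simp only [pv_length_d xs h1]

-- the central pointwise bridge: A's recheck of the k-th candidate equals B's O(1) test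
theorem pv_pointwise (xs : List Int) (h3 : 3 ≤ xs.length) (k : Nat) (hk : k < xs.length) :
    pvIsValidA (xs.take k ++ xs.drop (k + 1)) =
      pvOkB (xs.length : Int)
        (List.zipWith (fun a b => b - a) xs (xs.drop 1))
        (pvSufAll ((List.zipWith (fun a b => b - a) xs (xs.drop 1)).map (fun x => decide (1 ≤ x ∧ x ≤ 3))))
        (pvSufAll ((List.zipWith (fun a b => b - a) xs (xs.drop 1)).map (fun x => decide (-3 ≤ x ∧ x ≤ -1))))
        (pvPreAll ((List.zipWith (fun a b => b - a) xs (xs.drop 1)).map (fun x => decide (1 ≤ x ∧ x ≤ 3))))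
        (pvPreAll ((List.zipWith (fun a b => b - a) xs (xs.drop 1)).map (fun x => decide (-3 ≤ x ∧ x ≤ -1))))
        (k : Int) := by
  have hlc : (xs.take k ++ xs.drop (k + 1)).length = xs.length - 1 := pv_length_cand xs k hk
  have hdd : ∀ t, t + 1 < xs.length →
      (List.zipWith (fun a b => b - a) xs (xs.drop 1)).getD t 0 = pvDs xs t :=
    fun t ht => pv_d_getD xs t ht
  have hdc : ∀ j, j < xs.length - 1 - 1 →
      pvDs (xs.take k ++ xs.drop (k + 1)) j =
        if j + 1 < k then pvDs xs j
        else if j + 1 = k then pvDs xs (k - 1) + pvDs xs k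
        else pvDs xs (j + 1) := by
    intro j hj
    unfold pvDs
    rw [pv_cand_getD xs k (j + 1) hk (by omega), pv_cand_getD xs k j hk (by omega)]
    by_cases h1 : j + 1 < k
    · rw [if_pos h1, if_pos (by omega : j < k), if_pos h1]
    · by_cases h2 : j + 1 = k
      · rw [if_neg h1, if_pos (by omega : j < k), if_neg h1, if_pos h2]
        obtain rfl : k = j + 1 := h2.symm
        simp only [Nat.add_sub_cancel]
        ring
      · rw [if_neg h1, if_neg (by omega : ¬ j < k), if_neg h1, if_neg h2]
  rw [Bool.eq_iff_iff, pv_valA_eq _ (by rw [hlc]; omega), hlc]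
  unfold pvOkB
  by_cases hk0 : k = 0
  · subst hk0
    rw [if_pos (show ((((0 : Nat) : Int)) == 0) = true by decide)]
    rw [Bool.or_eq_true]
    have hs1 := pv_sufD xs (fun x => decide (1 ≤ x ∧ x ≤ 3)) 1 (by omega) (by omega)
    have hs2 := pv_sufD xs (fun x => decide (-3 ≤ x ∧ x ≤ -1)) 1 (by omega) (by omega)
    rw [Nat.cast_one] at hs1 hs2
    rw [hs1, hs2]
    simp only [decide_eq_true_eq]
    have side : ∀ (P : Int → Prop),
        (∀ j, j < xs.length - 1 - 1 → P (pvDs (xs.take 0 ++ xs.drop (0 + 1)) j)) ↔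
        (∀ t, t < xs.length - 1 → 1 ≤ t → P (pvDs xs t)) := by
      intro P
      constructor
      · intro h t ht h1t
        have := h (t - 1) (by omega)
        rw [hdc (t - 1) (by omega), if_neg (by omega), if_neg (by omega)] at this
        have e : t - 1 + 1 = t := by omega
        rwa [e] at this
      · intro h j hj
        rw [hdc j (by omega), if_neg (by omega), if_neg (by omega)]
        exact h (j + 1) (by omega) (by omega)
    constructor
    · rintro (h | h)
      · exact Or.inl (fun t ht h1t => by rw [hdd t (by omega)]; exact (side (fun v => 1 ≤ v ∧ v ≤ 3)).mp h t ht h1t)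
      · exact Or.inr (fun t ht h1t => by rw [hdd t (by omega)]; exact (side (fun v => -3 ≤ v ∧ v ≤ -1)).mp h t ht h1t)
    · rintro (h | h)
      · refine Or.inl ((side (fun v => 1 ≤ v ∧ v ≤ 3)).mpr (fun t ht h1t => ?_))
        have := h t ht h1t; rwa [hdd t (by omega)] at this
      · refine Or.inr ((side (fun v => -3 ≤ v ∧ v ≤ -1)).mpr (fun t ht h1t => ?_))
        have := h t ht h1t; rwa [hdd t (by omega)] at this
  · by_cases hkl : k = xs.length - 1
    · rw [if_neg (by simp; omega), if_pos (by simp; omega)]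
      rw [Bool.or_eq_true]
      have e2 : ((xs.length : Int) - 2) = ((xs.length - 2 : Nat) : Int) := by omega
      rw [e2]
      have hp1 := pv_preD xs (fun x => decide (1 ≤ x ∧ x ≤ 3)) (xs.length - 2) (by omega) (by omega)
      have hp2 := pv_preD xs (fun x => decide (-3 ≤ x ∧ x ≤ -1)) (xs.length - 2) (by omega) (by omega)
      rw [hp1, hp2]
      simp only [decide_eq_true_eq]
      have side : ∀ (P : Int → Prop),
          (∀ j, j < xs.length - 1 - 1 → P (pvDs (xs.take k ++ xs.drop (k + 1)) j)) ↔
          (∀ t, t < xs.length - 1 → t < xs.length - 2 → P (pvDs xs t)) := by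
        intro P
        constructor
        · intro h t ht ht2
          have := h t (by omega)
          rwa [hdc t (by omega), if_pos (by omega)] at this
        · intro h j hj
          rw [hdc j (by omega), if_pos (by omega)]
          exact h j (by omega) (by omega)
      constructor
      · rintro (h | h)
        · exact Or.inl (fun t ht ht2 => by rw [hdd t (by omega)]; exact (side (fun v => 1 ≤ v ∧ v ≤ 3)).mp h t ht ht2)
        · exact Or.inr (fun t ht ht2 => by rw [hdd t (by omega)]; exact (side (fun v => -3 ≤ v ∧ v ≤ -1)).mp h t ht ht2)
      · rintro (h | h)
        · refine Or.inl ((side (fun v => 1 ≤ v ∧ v ≤ 3)).mpr (fun t ht ht2 => ?_))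
          have := h t ht ht2; rwa [hdd t (by omega)] at this
        · refine Or.inr ((side (fun v => -3 ≤ v ∧ v ≤ -1)).mpr (fun t ht ht2 => ?_))
          have := h t ht ht2; rwa [hdd t (by omega)] at this
    · -- interior: 1 ≤ k ≤ n - 2
      rw [if_neg (by simp; omega), if_neg (by simp; omega)]
      simp only [Bool.or_eq_true, Bool.and_eq_true]
      have ek1 : ((k : Int) - 1) = ((k - 1 : Nat) : Int) := by omega
      have ek2 : ((k : Int) + 1) = ((k + 1 : Nat) : Int) := by omega
      rw [ek1, ek2]
      have hm : PySem.List.pyGetD (List.zipWith (fun a b => b - a) xs (xs.drop 1)) ((k - 1 : Nat) : Int) 0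
          + PySem.List.pyGetD (List.zipWith (fun a b => b - a) xs (xs.drop 1)) ((k : Nat) : Int) 0
          = pvDs xs (k - 1) + pvDs xs k := by
        rw [PySem.List.pyGetD_natCast, PySem.List.pyGetD_natCast,
            hdd (k - 1) (by omega), hdd k (by omega)]
      rw [hm]
      have hp1 := pv_preD xs (fun x => decide (1 ≤ x ∧ x ≤ 3)) (k - 1) (by omega) (by omega)
      have hp2 := pv_preD xs (fun x => decide (-3 ≤ x ∧ x ≤ -1)) (k - 1) (by omega) (by omega)
      have hs1 := pv_sufD xs (fun x => decide (1 ≤ x ∧ x ≤ 3)) (k + 1) (by omega) (by omega)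
      have hs2 := pv_sufD xs (fun x => decide (-3 ≤ x ∧ x ≤ -1)) (k + 1) (by omega) (by omega)
      rw [hp1, hp2, hs1, hs2]
      simp only [decide_eq_true_eq]
      have side : ∀ (P : Int → Prop),
          (∀ j, j < xs.length - 1 - 1 → P (pvDs (xs.take k ++ xs.drop (k + 1)) j)) ↔
          ((∀ t, t < xs.length - 1 → t < k - 1 → P (pvDs xs t)) ∧
           P (pvDs xs (k - 1) + pvDs xs k) ∧
           (∀ t, t < xs.length - 1 → k + 1 ≤ t → P (pvDs xs t))) := by
        intro P
        constructor
        · intro h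
          refine ⟨?_, ?_, ?_⟩
          · intro t ht htk
            have := h t (by omega)
            rwa [hdc t (by omega), if_pos (by omega)] at this
          · have := h (k - 1) (by omega)
            rwa [hdc (k - 1) (by omega), if_neg (by omega), if_pos (by omega)] at this
          · intro t ht htk
            have := h (t - 1) (by omega)
            rw [hdc (t - 1) (by omega), if_neg (by omega), if_neg (by omega)] at this
            have e : t - 1 + 1 = t := by omega
            rwa [e] at this
        · rintro ⟨h1, h2, h3⟩ j hj
          rw [hdc j (by omega)]
          split_ifs with c1 c2
          · exact h1 j (by omega) (by omega)
          · exact h2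
          · exact h3 (j + 1) (by omega) (by omega)
      constructor
      · rintro (h | h)
        · refine Or.inl ?_
          obtain ⟨h1, h2, h3⟩ := (side (fun v => 1 ≤ v ∧ v ≤ 3)).mp h
          exact ⟨⟨fun t ht htk => by rw [hdd t (by omega)]; exact h1 t ht htk, h2⟩,
                 fun t ht htk => by rw [hdd t (by omega)]; exact h3 t ht htk⟩
        · refine Or.inr ?_
          obtain ⟨h1, h2, h3⟩ := (side (fun v => -3 ≤ v ∧ v ≤ -1)).mp h
          exact ⟨⟨fun t ht htk => by rw [hdd t (by omega)]; exact h1 t ht htk, h2⟩,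
                 fun t ht htk => by rw [hdd t (by omega)]; exact h3 t ht htk⟩
      · rintro (⟨⟨h1, h2⟩, h3⟩ | ⟨⟨h1, h2⟩, h3⟩)
        · refine Or.inl ((side (fun v => 1 ≤ v ∧ v ≤ 3)).mpr ⟨fun t ht htk => ?_, h2, fun t ht htk => ?_⟩)
          · have := h1 t ht htk; rwa [hdd t (by omega)] at this
          · have := h3 t ht htk; rwa [hdd t (by omega)] at this
        · refine Or.inr ((side (fun v => -3 ≤ v ∧ v ≤ -1)).mpr ⟨fun t ht htk => ?_, h2, fun t ht htk => ?_⟩)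
          · have := h1 t ht htk; rwa [hdd t (by omega)] at this
          · have := h3 t ht htk; rwa [hdd t (by omega)] at this

theorem pv_main (numbers : List Int) :
    find_fixable_sequences numbers = find_fixable_sequences_alt numbers := by
  unfold find_fixable_sequences find_fixable_sequences_alt
  by_cases h2 : numbers.length ≤ 2
  · simp [h2]
  · simp only [if_neg h2]
    rw [PySem.List.foldl_append_if, PySem.List.foldl_append_if]
    simp only [List.nil_append]
    congr 1
    apply List.filter_congr
    intro i hi
    rw [PySem.List.mem_pyRange_one] at hi
    obtain ⟨k, rfl⟩ : ∃ k : Nat, i = (k : Int) := ⟨i.toNat, (Int.toNat_of_nonneg hi.1).symm⟩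
    have hk : k < numbers.length := by exact_mod_cast hi.2
    have hcast : (k : Int) + 1 = ((k + 1 : Nat) : Int) := by push_cast; ring
    rw [hcast, PySem.List.slice_to_natCast, PySem.List.slice_from_natCast]
    exact pv_pointwise numbers (by omega) k hk

-- ===== VERDICT (by name: the statement is the Claim_ definition above) =====
theorem find_fixable_sequences_spec : Claim_equal_find_fixable_sequences := by
  intro numbers _
  unfold Spec_find_fixable_sequences
  exact pv_main numbers
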